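-- pv_equiv track=rewrite | github.com/YuchenLi27/MechineLearningProject | src/build_weak_dataset.py | build_labels
-- ===== SOURCE A (Python) =====
-- def build_labels(tags):
--     n = len(tags)
--     switch_next = [-100] * n
--     dur3 = [-100] * n
--     for t in range(n - 1):
--         sw = int(tags[t] != tags[t + 1])
--         switch_next[t] = sw
--         if sw == 1:
--             L = 1
--             while (t + 1 + L) < n and tags[t + 1 + L] == tags[t + 1]:
--                 L += 1
--             dur3[t] = 0 if L <= 2 else (1 if L <= 5 else 2)
--     return switch_next, dur3
-- ===== SOURCE B (Python) =====
-- def build_labels(tags):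
--     n = len(tags)
--     # run length of the maximal block of equal tags starting at each index,
--     # built in a single right-to-left pass (list built backwards, then reversed)
--     run_len = []
--     prev_tag, prev_len = None, 0
--     for tag in reversed(tags):
--         prev_len = prev_len + 1 if tag == prev_tag else 1
--         run_len.append(prev_len)
--         prev_tag = tag
--     run_len.reverse()
--     tail = [-100] * (1 if n else 0)
--     switch_next = [int(a != b) for a, b in zip(tags, tags[1:])] + tail
--     dur3 = [(-100 if a == b else (0 if L <= 2 else 1 if L <= 5 else 2))
--             for (a, b), L in zip(zip(tags, tags[1:]), run_len[1:])] + tail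
--     return switch_next, dur3
-- ===== Notes on version B (the rewrite author's own statement) =====
-- stated objective: alternative
-- what changed: Replaces A's per-switch inner while-scan with a single right-to-left run-length pass plus zip comprehensions that build the two output lists directly instead of mutating sentinel arrays.
import Mathlib
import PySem

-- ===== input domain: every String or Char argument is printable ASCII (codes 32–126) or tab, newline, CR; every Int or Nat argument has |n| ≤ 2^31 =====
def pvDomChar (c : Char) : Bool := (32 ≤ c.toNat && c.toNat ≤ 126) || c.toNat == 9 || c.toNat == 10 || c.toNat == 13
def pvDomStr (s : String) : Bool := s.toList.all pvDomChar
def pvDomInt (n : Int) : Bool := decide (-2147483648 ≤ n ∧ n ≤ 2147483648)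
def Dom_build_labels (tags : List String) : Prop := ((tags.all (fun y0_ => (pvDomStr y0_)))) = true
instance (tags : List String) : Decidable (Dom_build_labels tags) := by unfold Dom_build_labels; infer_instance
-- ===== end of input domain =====

-- B replaces A's inner while-scan with one right-to-left run-length pass and builds the
-- outputs by zip comprehensions instead of sentinel-array mutation (alternative decomposition).

-- ===== PORT A =====
-- the inner `while (t+1+L) < n and tags[t+1+L] == tags[t+1]: L += 1` (t1 = t+1)
def aWhile (tags : List String) (t1 L : Nat) : Nat :=
  if _h : t1 + L < tags.length ∧ tags.getD (t1 + L) "" = tags.getD t1 "" then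
    aWhile tags t1 (L + 1)
  else L
termination_by tags.length - (t1 + L)

-- the body of A's for-loop
def aStep (tags : List String) (st : List Int × List Int) (t : Int) : List Int × List Int :=
  let tn := t.toNat
  let sw : Int := if tags.getD tn "" ≠ tags.getD (tn + 1) "" then 1 else 0
  let s1 := st.1.set tn sw
  if sw = 1 then
    let L := aWhile tags (tn + 1) 1
    (s1, st.2.set tn (if L ≤ 2 then 0 else if L ≤ 5 then 1 else 2))
  else (s1, st.2)

def build_labels (tags : List String) : List Int × List Int :=
  let n := tags.length
  let switch0 : List Int := List.replicate n (-100)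
  let dur0 : List Int := List.replicate n (-100)
  (PySem.List.pyRange 0 ((n : Int) - 1) 1).foldl (aStep tags) (switch0, dur0)

-- ===== PORT B =====
def build_labels_alt (tags : List String) : List Int × List Int :=
  let n := tags.length
  -- for tag in reversed(tags): prev_len = prev_len+1 if tag==prev_tag else 1; run_len.append(prev_len); prev_tag = tag
  let st := tags.reverse.foldl
    (fun (st : List Nat × Option String × Nat) tag =>
      let pl := if some tag = st.2.1 then st.2.2 + 1 else 1
      (st.1 ++ [pl], some tag, pl))
    ([], none, 0)
  let run_len := st.1.reverse
  let tail : List Int := if n ≠ 0 then [-100] else []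
  let pairs := tags.zip (tags.drop 1)
  let switch_next := pairs.map (fun ab => if ab.1 ≠ ab.2 then (1 : Int) else 0) ++ tail
  let dur3 :=
    (List.zipWith
      (fun (ab : String × String) (L : Nat) =>
        if ab.1 = ab.2 then (-100 : Int) else if L ≤ 2 then 0 else if L ≤ 5 then 1 else 2)
      pairs (run_len.drop 1)) ++ tail
  (switch_next, dur3)

-- ===== PRECONDITION & SPEC =====
def Spec_build_labels (tags : List String) (out : List Int × List Int) : Prop := out = build_labels_alt tags
instance (tags : List String) (out : List Int × List Int) : Decidable (Spec_build_labels tags out) := by unfold Spec_build_labels; infer_instance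

-- ===== CLAIM (what is proved, stated in full; the proofs are below) =====
def Claim_equal_build_labels : Prop := ∀ (tags : List String), Dom_build_labels tags → Spec_build_labels tags (build_labels tags)

-- ===== LEMMAS AND PROOFS =====

-- length of the maximal equal-run at the head
def runFrom : List String → Nat
  | [] => 0
  | [_] => 1
  | x :: y :: r => if x = y then runFrom (y :: r) + 1 else 1

-- length of the prefix equal to a
def matchCount (a : String) : List String → Nat
  | [] => 0
  | x :: r => if x = a then matchCount a r + 1 else 0

-- reference run-length table
def rl : List String → List Nat
  | [] => []
  | [_] => [1]
  | x :: y :: r => (if x = y then (rl (y :: r)).headD 1 + 1 else 1) :: rl (y :: r)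

theorem runFrom_cons (x : String) (r : List String) : runFrom (x :: r) = 1 + matchCount x r := by
  induction r generalizing x with
  | nil => simp [runFrom, matchCount]
  | cons y r ih =>
    by_cases h : x = y
    · subst h
      simp [runFrom, matchCount, ih x]
      omega
    · simp [runFrom, matchCount, h, Ne.symm h]

theorem aWhile_eq (tags : List String) (t1 L : Nat) :
    aWhile tags t1 L = L + matchCount (tags.getD t1 "") (tags.drop (t1 + L)) := by
  induction hk : tags.length - (t1 + L) generalizing L with
  | zero =>
    have hge : tags.length ≤ t1 + L := by omega
    rw [aWhile, dif_neg (by omega : ¬ (t1 + L < tags.length ∧ tags.getD (t1 + L) "" = tags.getD t1 ""))]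
    simp [List.drop_eq_nil_of_le hge, matchCount]
  | succ k ih =>
    have hlt : t1 + L < tags.length := by omega
    have hdrop : tags.drop (t1 + L) = tags[t1 + L] :: tags.drop (t1 + L + 1) :=
      List.drop_eq_getElem_cons hlt
    have hgd : tags.getD (t1 + L) "" = tags[t1 + L] := List.getD_eq_getElem _ _ hlt
    rw [aWhile]
    by_cases hc : tags.getD (t1 + L) "" = tags.getD t1 ""
    · rw [dif_pos ⟨hlt, hc⟩, ih (L + 1) (by omega)]
      rw [show t1 + (L + 1) = t1 + L + 1 by omega]
      rw [hdrop]
      simp [matchCount, hgd ▸ hc]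
      omega
    · rw [dif_neg (by tauto), hdrop]
      simp only [matchCount, List.getD]
      rw [if_neg (hgd ▸ hc)]
      omega

theorem aWhile_runFrom (tags : List String) (t1 : Nat) (h : t1 < tags.length) :
    aWhile tags t1 1 = runFrom (tags.drop t1) := by
  rw [aWhile_eq, List.drop_eq_getElem_cons h, runFrom_cons, List.getD_eq_getElem _ _ h]

theorem rl_length (l : List String) : (rl l).length = l.length := by
  induction l using rl.induct <;> simp_all [rl]

theorem rl_ne_nil (x : String) (r : List String) : rl (x :: r) ≠ [] := by
  cases r <;> simp [rl]

theorem rl_head (x : String) (r : List String) : (rl (x :: r)).headD 0 = runFrom (x :: r) := by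
  induction r generalizing x with
  | nil => simp [rl, runFrom]
  | cons y r ih =>
    cases hrl : rl (y :: r) with
    | nil => exact absurd hrl (rl_ne_nil y r)
    | cons a t =>
      have ha : a = runFrom (y :: r) := by
        have := ih y; rw [hrl] at this; simpa using this
      by_cases h : x = y <;> simp [rl, runFrom, h, hrl, ha]

theorem rl_getD (l : List String) (i : Nat) (h : i < l.length) :
    (rl l).getD i 0 = runFrom (l.drop i) := by
  induction l generalizing i with
  | nil => simp at h
  | cons x r ih =>
    cases i with
    | zero =>
      have hh := rl_head x r
      cases hrl : rl (x :: r) with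
      | nil => exact absurd hrl (rl_ne_nil x r)
      | cons a t => rw [hrl] at hh; simpa using hh
    | succ i =>
      cases r with
      | nil => simp at h
      | cons y r' =>
        have : (rl (x :: y :: r')).getD (i + 1) 0 = (rl (y :: r')).getD i 0 := by
          simp [rl]
        rw [this, ih i (by simpa using Nat.lt_of_succ_lt_succ h)]
        simp

-- the reverse fold of B computes rl (reversed)
theorem bfold (l : List String) :
    l.reverse.foldl
      (fun (st : List Nat × Option String × Nat) tag =>
        let pl := if some tag = st.2.1 then st.2.2 + 1 else 1
        (st.1 ++ [pl], some tag, pl))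
      ([], none, 0)
    = ((rl l).reverse, l.head?, (rl l).headD 0) := by
  induction l with
  | nil => simp [rl]
  | cons x l ih =>
    rw [List.reverse_cons, List.foldl_append, ih]
    cases l with
    | nil => simp [rl]
    | cons y r =>
      cases hrl : rl (y :: r) with
      | nil => exact absurd hrl (rl_ne_nil y r)
      | cons a t => by_cases h : x = y <;> simp [rl, h, hrl]

-- pointwise value of A's loop
def swF (tags : List String) (j : Nat) : Int :=
  if tags.getD j "" ≠ tags.getD (j + 1) "" then 1 else 0

def duF (tags : List String) (j : Nat) : Int :=
  if runFrom (tags.drop (j + 1)) ≤ 2 then 0 else if runFrom (tags.drop (j + 1)) ≤ 5 then 1 else 2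

theorem set_map_range (f : Nat → Int) (n m : Nat) (v : Int) :
    ((List.range n).map f).set m v
      = (List.range n).map (fun j => if j = m then v else f j) := by
  apply List.ext_getElem (by simp)
  intro j h1 h2
  simp only [List.getElem_set, List.getElem_map, List.getElem_range]
  by_cases hj : m = j
  · subst hj; simp
  · rw [if_neg hj, if_neg (fun h => hj h.symm)]

theorem A_inv (tags : List String) (m : Nat) (hm : m + 1 ≤ tags.length) :
    (PySem.List.pyRange 0 (m : Int) 1).foldl (aStep tags)
      (List.replicate tags.length (-100), List.replicate tags.length (-100))
    = ((List.range tags.length).map (fun j => if j < m then swF tags j else -100),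
       (List.range tags.length).map (fun j => if j < m ∧ swF tags j = 1 then duF tags j else -100)) := by
  induction m with
  | zero =>
    rw [Nat.cast_zero, PySem.List.pyRange_one_eq_nil (le_refl 0)]
    simp [List.map_const']
  | succ m ih =>
    have hmlt : m < tags.length := by omega
    have h0 : ((m + 1 : Nat) : Int) = (m : Int) + 1 := by push_cast; ring
    rw [h0, PySem.List.pyRange_one_succ_right (by exact_mod_cast Nat.zero_le m),
        List.foldl_append, ih (by omega), List.foldl_cons, List.foldl_nil]
    simp only [aStep, Int.toNat_natCast]
    split
    case isTrue hcond =>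
      have hswF : swF tags m = 1 := by unfold swF; rw [if_pos hcond]
      have hL : aWhile tags (m + 1) 1 = runFrom (tags.drop (m + 1)) :=
        aWhile_runFrom tags (m + 1) (by omega)
      have hc2 : ¬ tags[m]?.getD "" = tags[m + 1]?.getD "" := by simpa [List.getD] using hcond
      rw [set_map_range _ _ m, set_map_range _ _ m]
      refine Prod.ext ?_ ?_
      · apply List.map_congr_left
        intro j hj
        rw [List.mem_range] at hj
        by_cases h1 : j = m
        · subst h1; simp [swF, hc2]
        · by_cases h2 : j < m <;> simp [h1, h2, show j < m + 1 ↔ j < m ∨ j = m by omega]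
      · apply List.map_congr_left
        intro j hj
        rw [List.mem_range] at hj
        by_cases h1 : j = m
        · subst h1; simp [hswF, duF, hL]
        · by_cases h2 : j < m <;> simp [h1, h2, show j < m + 1 ↔ j < m ∨ j = m by omega]
    case isFalse hcond =>
      have heq : tags.getD m "" = tags.getD (m + 1) "" := not_not.mp hcond
      have hswF : swF tags m = 0 := by unfold swF; rw [if_neg (fun k => k heq)]
      have hc2 : tags[m]?.getD "" = tags[m + 1]?.getD "" := by simpa [List.getD] using heq
      rw [set_map_range _ _ m]
      refine Prod.ext ?_ ?_
      · apply List.map_congr_left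
        intro j hj
        rw [List.mem_range] at hj
        by_cases h1 : j = m
        · subst h1; simp [swF, hc2]
        · by_cases h2 : j < m <;> simp [h1, h2, show j < m + 1 ↔ j < m ∨ j = m by omega]
      · apply List.map_congr_left
        intro j hj
        rw [List.mem_range] at hj
        by_cases h1 : j = m
        · subst h1; simp [hswF]
        · by_cases h2 : j < m <;> simp [h1, h2, show j < m + 1 ↔ j < m ∨ j = m by omega]

theorem B_char (tags : List String) :
    build_labels_alt tags
    = ((List.range tags.length).map (fun j => if j < tags.length - 1 then swF tags j else -100),
       (List.range tags.length).map
         (fun j => if j < tags.length - 1 ∧ swF tags j = 1 then duF tags j else -100)) := by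
  cases tags with
  | nil => simp [build_labels_alt]
  | cons x r =>
    simp only [build_labels_alt, bfold, List.reverse_reverse]
    have hdrop1 : List.drop 1 (x :: r) = r := rfl
    have hlen : (rl (x :: r)).length = r.length + 1 := by
      have := rl_length (x :: r); simpa using this
    have htail : (if (x :: r).length ≠ 0 then ([-100] : List Int) else []) = [-100] := by simp
    rw [hdrop1, htail]
    have hzl : ((x :: r).zip r).length = r.length := by simp [List.length_zip]
    refine Prod.ext ?_ ?_
    · show List.map _ ((x :: r).zip r) ++ [-100] = _
      apply List.ext_getElem (by simp [List.length_zip])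
      intro j h1 h2
      simp only [List.getElem_map, List.getElem_range, List.length_range, List.length_map, List.length_cons] at h2 ⊢
      by_cases hj : j < r.length
      · rw [List.getElem_append_left (by simp [List.length_zip]; omega), List.getElem_map, List.getElem_zip]
        have hswFj : swF (x :: r) j = if (x :: r)[j]'(by simp; omega) ≠ r[j]'hj then 1 else 0 := by
          unfold swF
          rw [List.getD_eq_getElem _ _ (by simp; omega), List.getD_eq_getElem _ _ (by simp; omega),
              List.getElem_cons_succ]
        rw [if_pos (show j < r.length + 1 - 1 from by omega), hswFj]
      · have hj' : j = r.length := by omega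
        subst hj'
        rw [List.getElem_append_right (by simp [List.length_zip])]
        rw [if_neg (by omega)]
        simp [hzl]
    · show List.zipWith _ ((x :: r).zip r) ((rl (x :: r)).drop 1) ++ [-100] = _
      have hzwl : (List.zipWith
          (fun (ab : String × String) (L : Nat) =>
            if ab.1 = ab.2 then (-100 : Int) else if L ≤ 2 then 0 else if L ≤ 5 then 1 else 2)
          ((x :: r).zip r) ((rl (x :: r)).drop 1)).length = r.length := by
        simp [List.length_zipWith, List.length_zip, hlen]
      apply List.ext_getElem (by rw [List.length_append, hzwl]; simp)
      intro j h1 h2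
      simp only [List.getElem_map, List.getElem_range, List.length_range, List.length_map, List.length_cons] at h2 ⊢
      by_cases hj : j < r.length
      · rw [List.getElem_append_left (by rw [hzwl]; omega), List.getElem_zipWith, List.getElem_zip]
        have hswFj : swF (x :: r) j = if (x :: r)[j]'(by simp; omega) ≠ r[j]'hj then 1 else 0 := by
          unfold swF
          rw [List.getD_eq_getElem _ _ (by simp; omega), List.getD_eq_getElem _ _ (by simp; omega),
              List.getElem_cons_succ]
        have hget : ((rl (x :: r)).drop 1)[j]'(by simp [hlen]; omega)
            = runFrom ((x :: r).drop (j + 1)) := by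
          rw [← List.getD_eq_getElem _ 0 (by simp [hlen]; omega)]
          have hstep : ((rl (x :: r)).drop 1).getD j 0 = (rl (x :: r)).getD (j + 1) 0 := by
            simp [List.getD]
          rw [hstep, rl_getD _ _ (by simp; omega)]
        by_cases hxy : (x :: r)[j]'(by simp; omega) = r[j]'hj
        · rw [if_pos hxy,
              if_neg (show ¬ (j < r.length + 1 - 1 ∧ swF (x :: r) j = 1) from by
                rw [hswFj]; simp [hxy])]
        · rw [if_neg hxy,
              if_pos (show j < r.length + 1 - 1 ∧ swF (x :: r) j = 1 from
                ⟨by omega, by rw [hswFj]; simp [hxy]⟩)]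
          unfold duF
          rw [hget]
      · have hj' : j = r.length := by omega
        subst hj'
        rw [List.getElem_append_right (le_of_eq hzwl)]
        rw [if_neg (by omega)]
        simp
-- ===== VERDICT (by name: the statement is the Claim_ definition above) =====
theorem build_labels_spec : Claim_equal_build_labels := by
  intro tags _
  unfold Spec_build_labels
  rw [B_char]
  cases tags with
  | nil => simp [build_labels]
  | cons x r =>
    show (PySem.List.pyRange 0 (((x :: r).length : Int) - 1) 1).foldl (aStep (x :: r))
        (List.replicate (x :: r).length (-100), List.replicate (x :: r).length (-100)) = _
    have h1 : (((x :: r).length : Int)) - 1 = ((r.length : Nat) : Int) := by simp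
    rw [h1, A_inv (x :: r) r.length (by simp)]
    simp
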